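-- pv_equiv track=rewrite | github.com/Daniel-Berger/AI-Curriculum | Python-Learning/05-llms-and-genai/02-tokenization/solutions.py | tokenize_with_spaces
-- ===== SOURCE A (Python) =====
-- def tokenize_with_spaces(text: str) -> list[str]:
--     """
--     Tokenize text while preserving space information.
--     """
--     # Split on whitespace but keep track of spaces
--     tokens = []
--     current_token = ''
--
--     for char in text:
--         if char == ' ':
--             if current_token:
--                 tokens.append(current_token)
--                 current_token = ''
--             # Next word gets space prefix
--         else:
--             if not current_token and tokens and not tokens[-1].startswith(' '):
--                 current_token = ' '
--             current_token += char
--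
--     if current_token:
--         tokens.append(current_token)
--
--     return tokens if tokens else ['']
-- ===== SOURCE B (Python) =====
-- def tokenize_with_spaces(text: str) -> list[str]:
--     # Split on single spaces, drop empties, then prefix every odd-indexed word with a space.
--     words = [w for w in text.split(' ') if w]
--     result = [(' ' + w if i % 2 == 1 else w) for i, w in enumerate(words)]
--     return result if result else ['']
-- ===== Notes on version B (the rewrite author's own statement) =====
-- stated objective: simpler
-- what changed: Replaces A's char-by-char state machine (current-token buffer plus a last-token-starts-with-space check) with a split-on-space, filter-empties, then an index-parity map that adds the space prefix to every odd-indexed word.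
import Mathlib
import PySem

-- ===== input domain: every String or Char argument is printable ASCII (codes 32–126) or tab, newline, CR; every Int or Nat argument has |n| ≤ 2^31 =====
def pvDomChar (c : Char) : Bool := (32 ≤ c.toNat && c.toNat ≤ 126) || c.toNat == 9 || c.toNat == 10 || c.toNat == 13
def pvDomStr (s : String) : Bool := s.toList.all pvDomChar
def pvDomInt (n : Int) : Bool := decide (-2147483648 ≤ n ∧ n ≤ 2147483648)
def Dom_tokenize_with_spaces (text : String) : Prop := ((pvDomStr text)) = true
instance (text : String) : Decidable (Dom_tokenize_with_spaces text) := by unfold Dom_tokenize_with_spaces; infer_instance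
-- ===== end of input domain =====

-- B replaces A's char-by-char state machine with split-on-space / filter / index-parity map; objective: simpler.

-- ===== PORT A =====
-- A's for-loop over the characters; state = (tokens, current_token).  current_token is
-- modeled as a List Char (Python builds it by string concatenation char by char); it becomes
-- a String exactly when A appends it to tokens.  tokens[-1] is PySem.List.pyGet? tokens (-1);
-- the .getD "" default is unreachable because Python's short-circuit `tokens and ...`
-- guarantees tokens is nonempty there.
def tokenize_with_spaces_loop : List Char → List String → List Char → List String × List Char
  | [], tokens, cur => (tokens, cur)
  | c :: cs, tokens, cur =>
    if c = ' ' then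
      if cur ≠ [] then tokenize_with_spaces_loop cs (tokens ++ [String.ofList cur]) []
      else tokenize_with_spaces_loop cs tokens cur
    else
      let cur1 := if cur = [] ∧ tokens ≠ [] ∧
          ¬ (PySem.Str.startswith ((PySem.List.pyGet? tokens (-1)).getD "") " " = true)
        then [' '] else cur
      tokenize_with_spaces_loop cs tokens (cur1 ++ [c])

def tokenize_with_spaces (text : String) : List String :=
  let st := tokenize_with_spaces_loop text.toList [] []
  let tokens := if st.2 ≠ [] then st.1 ++ [String.ofList st.2] else st.1
  if tokens = [] then [""] else tokens

-- ===== PORT B =====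
-- Source B: words = [w for w in text.split(' ') if w];
--       result = [(' ' + w if i % 2 == 1 else w) for i, w in enumerate(words)];
--       return result if result else [''].
-- text.split(' ') (single-char separator) is List.splitOn ' ' on the code points, exact.
def tokenize_with_spaces_alt (text : String) : List String :=
  let words := (text.toList.splitOn ' ').filter (fun w => w ≠ [])
  let result := (PySem.List.enumerate words).map
    (fun iw => if iw.1 % 2 == 1 then String.ofList (' ' :: iw.2) else String.ofList iw.2)
  if result = [] then [""] else result

-- ===== PRECONDITION & SPEC =====
def Spec_tokenize_with_spaces (text : String) (out : List String) : Prop := out = tokenize_with_spaces_alt text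
instance (text : String) (out : List String) : Decidable (Spec_tokenize_with_spaces text out) := by unfold Spec_tokenize_with_spaces; infer_instance

-- ===== CLAIM (what is proved, stated in full; the proofs are below) =====
def Claim_equal_tokenize_with_spaces : Prop := ∀ (text : String), Dom_tokenize_with_spaces text → Spec_tokenize_with_spaces text (tokenize_with_spaces text)

-- ===== LEMMAS AND PROOFS =====

-- the words still to be produced from cs, given the pending (space-free) partial word p
def pvWaux : List Char → List Char → List (List Char)
  | [], p => if p = [] then [] else [p]
  | c :: cs, p =>
    if c = ' ' then (if p = [] then pvWaux cs [] else p :: pvWaux cs [])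
    else pvWaux cs (p ++ [c])

-- render a word list to output tokens, starting at global word index k
def pvRender (k : Nat) : List (List Char) → List String
  | [] => []
  | w :: ws => (if k % 2 = 1 then String.ofList (' ' :: w) else String.ofList w) :: pvRender (k + 1) ws

-- A's current_token when n words are done and p is the pending partial word
def pvCurOf (n : Nat) (p : List Char) : List Char :=
  if p = [] then [] else (if n % 2 = 1 then ' ' :: p else p)

def pvFinish (st : List String × List Char) : List String :=
  if st.2 ≠ [] then st.1 ++ [String.ofList st.2] else st.1

theorem pvRender_append (vs ws : List (List Char)) (k : Nat) :
    pvRender k (vs ++ ws) = pvRender k vs ++ pvRender (k + vs.length) ws := by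
  induction vs generalizing k with
  | nil => simp [pvRender]
  | cons v vs ih => simp [pvRender, ih, Nat.add_assoc, Nat.add_comm 1 vs.length]

theorem pvRender_ne_nil (k : Nat) (ws : List (List Char)) (h : ws ≠ []) :
    pvRender k ws ≠ [] := by
  cases ws with
  | nil => exact absurd rfl h
  | cons w ws => simp [pvRender]

theorem pvGet_neg_one (xs : List String) (x : String) :
    PySem.List.pyGet? (xs ++ [x]) (-1) = some x := by
  simp [PySem.List.pyGet?, PySem.List.pyIdx?]

theorem pvStartsLast (vs : List (List Char)) (w : List Char) (hw : w ≠ []) (hs : ' ' ∉ w) :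
    PySem.Str.startswith ((PySem.List.pyGet? (pvRender 0 (vs ++ [w])) (-1)).getD "") " "
      = decide (vs.length % 2 = 1) := by
  obtain ⟨c, w', rfl⟩ : ∃ c w', w = c :: w' := by
    cases w with
    | nil => exact absurd rfl hw
    | cons c w' => exact ⟨c, w', rfl⟩
  have hc : ' ' ≠ c := fun h => hs (h ▸ List.mem_cons_self)
  rw [pvRender_append]
  simp only [pvRender, Nat.zero_add]
  rw [pvGet_neg_one]
  by_cases h : vs.length % 2 = 1 <;>
    simp [h, PySem.Str.startswith_eq, PySem.Chars.startswith, List.isPrefixOf, hc]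

theorem pvCurOf_snoc (n : Nat) (p : List Char) (c : Char) (hp : p ≠ []) :
    pvCurOf n p ++ [c] = pvCurOf n (p ++ [c]) := by
  unfold pvCurOf
  split_ifs <;> simp_all

theorem pvLoop_space_cons (cs : List Char) (tokens : List String) (cur : List Char) (h : cur ≠ []) :
    tokenize_with_spaces_loop (' ' :: cs) tokens cur
      = tokenize_with_spaces_loop cs (tokens ++ [String.ofList cur]) [] := by
  simp [tokenize_with_spaces_loop, h]

theorem pvLoop_space_nil (cs : List Char) (tokens : List String) :
    tokenize_with_spaces_loop (' ' :: cs) tokens [] = tokenize_with_spaces_loop cs tokens [] := by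
  simp [tokenize_with_spaces_loop]

theorem pvLoop_char (c : Char) (cs : List Char) (tokens : List String) (cur : List Char) (h : c ≠ ' ') :
    tokenize_with_spaces_loop (c :: cs) tokens cur
      = tokenize_with_spaces_loop cs tokens
          ((if cur = [] ∧ tokens ≠ [] ∧
              ¬ (PySem.Str.startswith ((PySem.List.pyGet? tokens (-1)).getD "") " " = true)
            then [' '] else cur) ++ [c]) := by
  simp [tokenize_with_spaces_loop, h]

theorem pvCurOf_nil (n : Nat) : pvCurOf n [] = [] := by simp [pvCurOf]

theorem pvLoop_render : ∀ (cs : List Char) (vs : List (List Char)) (p : List Char),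
    (∀ w ∈ vs, w ≠ [] ∧ ' ' ∉ w) → ' ' ∉ p →
    pvFinish (tokenize_with_spaces_loop cs (pvRender 0 vs) (pvCurOf vs.length p))
      = pvRender 0 (vs ++ pvWaux cs p) := by
  intro cs
  induction cs with
  | nil =>
    intro vs p hv hp
    by_cases hpn : p = []
    · subst hpn; simp [tokenize_with_spaces_loop, pvCurOf, pvWaux, pvFinish]
    · simp only [tokenize_with_spaces_loop, pvWaux, if_neg hpn, pvFinish]
      rw [pvRender_append]
      by_cases h : vs.length % 2 = 1 <;> simp [pvCurOf, hpn, h, pvRender]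
  | cons c cs ih =>
    intro vs p hv hp
    by_cases hsp : c = ' '
    · subst hsp
      by_cases hpn : p = []
      · subst hpn
        have h0 := ih vs [] hv (by simp)
        rw [pvCurOf_nil] at h0 ⊢
        rw [pvLoop_space_nil, h0]
        simp [pvWaux]
      · have hcur : pvCurOf vs.length p ≠ [] := by unfold pvCurOf; split_ifs <;> simp_all
        have h1 : pvRender 0 vs ++ [String.ofList (pvCurOf vs.length p)] = pvRender 0 (vs ++ [p]) := by
          rw [pvRender_append]
          by_cases h : vs.length % 2 = 1 <;> simp [pvCurOf, hpn, h, pvRender]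
        have hv' : ∀ w ∈ vs ++ [p], w ≠ [] ∧ ' ' ∉ w := by
          intro w hw
          rcases List.mem_append.mp hw with h | h
          · exact hv w h
          · simp only [List.mem_singleton] at h; subst h; exact ⟨hpn, hp⟩
        have h2 := ih (vs ++ [p]) [] hv' (by simp)
        rw [pvCurOf_nil] at h2
        rw [pvLoop_space_cons _ _ _ hcur, h1, h2]
        simp [pvWaux, hpn, List.append_assoc]
    · -- c ≠ ' '
      have hwx : pvWaux (c :: cs) p = pvWaux cs (p ++ [c]) := by simp [pvWaux, hsp]
      have hp' : ' ' ∉ p ++ [c] := by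
        simp only [List.mem_append, List.mem_singleton]
        rintro (h | h)
        · exact hp h
        · exact hsp h.symm
      have harg : (if pvCurOf vs.length p = [] ∧ pvRender 0 vs ≠ [] ∧
              ¬ (PySem.Str.startswith ((PySem.List.pyGet? (pvRender 0 vs) (-1)).getD "") " " = true)
            then [' '] else pvCurOf vs.length p) ++ [c] = pvCurOf vs.length (p ++ [c]) := by
        by_cases hpn : p = []
        · subst hpn
          rw [pvCurOf_nil]
          rcases List.eq_nil_or_concat vs with rfl | ⟨vs', w, rfl⟩
          · simp [pvRender, pvCurOf]
          · simp only [List.concat_eq_append]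
            have hvw := hv w (by simp)
            rw [pvStartsLast vs' w hvw.1 hvw.2]
            have hne := pvRender_ne_nil 0 (vs' ++ [w]) (by simp)
            have hlen : (vs' ++ [w]).length = vs'.length + 1 := by simp
            by_cases h : vs'.length % 2 = 1
            · simp only [pvCurOf, hlen]
              simp [hne, h]
              omega
            · simp only [pvCurOf, hlen]
              simp [hne, h]
              omega
        · have hcur : pvCurOf vs.length p ≠ [] := by unfold pvCurOf; split_ifs <;> simp_all
          simp [hcur, pvCurOf_snoc _ _ _ hpn]
      rw [pvLoop_char c cs _ _ hsp, harg, ih vs (p ++ [c]) hv hp', hwx]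

theorem pvSplitOnP_ne_nil (q : Char → Bool) (cs : List Char) : List.splitOnP q cs ≠ [] := by
  induction cs with
  | nil => simp [List.splitOnP_nil]
  | cons c cs ih =>
    rw [List.splitOnP_cons]
    split_ifs
    · simp
    · cases h : List.splitOnP q cs with
      | nil => exact absurd h ih
      | cons a t => simp [List.modifyHead]

theorem pvSplit_filter : ∀ (cs p : List Char),
    (((List.splitOnP (· == ' ') cs).modifyHead (p ++ ·)).filter (fun w => w ≠ []))
      = pvWaux cs p := by
  intro cs
  induction cs with
  | nil =>
    intro p
    by_cases hp : p = [] <;> simp [List.splitOnP_nil, pvWaux, hp, List.filter]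
  | cons c cs ih =>
    intro p
    rw [List.splitOnP_cons]
    by_cases hsp : c = ' '
    · subst hsp
      simp only [List.modifyHead]
      have h0 : (List.splitOnP (· == ' ') cs).filter (fun w => !decide (w = [])) = pvWaux cs [] := by
        have h1 := ih []
        rw [show List.modifyHead (fun x => ([] : List Char) ++ x) (List.splitOnP (· == ' ') cs)
              = List.splitOnP (· == ' ') cs from by
          cases List.splitOnP (· == ' ') cs <;> simp [List.modifyHead]] at h1
        simpa using h1
      by_cases hp : p = [] <;> simp [pvWaux, hp, h0]
    · rw [if_neg (by simp [hsp])]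
      cases h : List.splitOnP (· == ' ') cs with
      | nil => exact absurd h (pvSplitOnP_ne_nil _ _)
      | cons a t =>
        have := ih (p ++ [c])
        rw [h] at this
        simp only [List.modifyHead] at this ⊢
        simp only [pvWaux, if_neg hsp]
        rw [← this]
        simp

theorem pvEnum_render : ∀ (ws : List (List Char)) (k : Nat),
    (PySem.List.enumerate ws (k : Int)).map
        (fun iw => if iw.1 % 2 == 1 then String.ofList (' ' :: iw.2) else String.ofList iw.2)
      = pvRender k ws := by
  intro ws
  induction ws with
  | nil => intro k; simp [PySem.List.enumerate_nil, pvRender]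
  | cons w ws ih =>
    intro k
    rw [PySem.List.enumerate_cons, List.map_cons]
    have hk1 : ((k : Int) + 1) = ((k + 1 : Nat) : Int) := by push_cast; ring
    rw [hk1, ih (k + 1)]
    by_cases h : k % 2 = 1
    · have h2 : (k : Int) % 2 = 1 := by omega
      simp [pvRender, h, h2]
    · have h2 : (k : Int) % 2 = 0 := by omega
      simp [pvRender, h, h2]

-- ===== VERDICT (by name: the statement is the Claim_ definition above) =====
theorem tokenize_with_spaces_spec : Claim_equal_tokenize_with_spaces := by
  intro text _
  unfold Spec_tokenize_with_spaces tokenize_with_spaces tokenize_with_spaces_alt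
  have hA : pvFinish (tokenize_with_spaces_loop text.toList [] []) = pvRender 0 (pvWaux text.toList []) := by
    simpa [pvRender, pvCurOf] using pvLoop_render text.toList [] [] (by simp) (by simp)
  have hw : (text.toList.splitOn ' ').filter (fun w => w ≠ []) = pvWaux text.toList [] := by
    have := pvSplit_filter text.toList []
    have hid : (List.splitOnP (· == ' ') text.toList).modifyHead (([] : List Char) ++ ·) = List.splitOnP (· == ' ') text.toList := by
      cases List.splitOnP (· == ' ') text.toList <;> simp [List.modifyHead]
    rw [hid] at this
    simpa [List.splitOn] using this
  have hB : (PySem.List.enumerate ((text.toList.splitOn ' ').filter (fun w => w ≠ []))).map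
        (fun iw => if iw.1 % 2 == 1 then String.ofList (' ' :: iw.2) else String.ofList iw.2)
      = pvRender 0 (pvWaux text.toList []) := by
    rw [hw]
    simpa using pvEnum_render (pvWaux text.toList []) 0
  simp only []
  rw [show (if (tokenize_with_spaces_loop text.toList [] []).2 ≠ [] then
        (tokenize_with_spaces_loop text.toList [] []).1 ++ [String.ofList (tokenize_with_spaces_loop text.toList [] []).2]
      else (tokenize_with_spaces_loop text.toList [] []).1) = pvFinish (tokenize_with_spaces_loop text.toList [] []) from rfl]
  rw [hA, hB]
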